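-- pv_equiv track=rewrite | github.com/theabbie/leetcode | miscellaneous/A_Two_Towers.py | check
-- ===== SOURCE A (Python) =====
-- def valid(a):
--     n = len(a)
--     for i in range(n - 1):
--         if a[i] == a[i + 1]:
--             return False
--     return True
--
-- def check(a, b):
--     while len(a) > 1:
--         b.append(a.pop())
--     if valid(b):
--         return "YES"
--     while len(b) > 1:
--         a.append(b.pop())
--         if valid(a) and valid(b):
--             return "YES"
--     return "NO"
-- ===== SOURCE B (Python) =====
-- def check(a, b):
--     # O(n) closed form: combine stacks into one sequence and count adjacent equal pairs.
--     # (A mutates a and b in place; B does not -- equivalence is about the return value.)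
--     s = b + a[:0:-1]
--     eq = sum(1 for x, y in zip(s, s[1:]) if x == y)
--     if eq == 0:
--         return "YES"
--     if eq == 1 and (not a or a[0] != s[-1]):
--         return "YES"
--     return "NO"
-- ===== Notes on version B (the rewrite author's own statement) =====
-- stated objective: faster
-- what changed: A physically moves elements between the two stacks and re-scans whole lists with valid() after every move (O(n^2)); B builds the combined sequence once, counts its adjacent equal pairs in one pass, and answers from that count plus one boundary comparison (O(n)).
import Mathlib
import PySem

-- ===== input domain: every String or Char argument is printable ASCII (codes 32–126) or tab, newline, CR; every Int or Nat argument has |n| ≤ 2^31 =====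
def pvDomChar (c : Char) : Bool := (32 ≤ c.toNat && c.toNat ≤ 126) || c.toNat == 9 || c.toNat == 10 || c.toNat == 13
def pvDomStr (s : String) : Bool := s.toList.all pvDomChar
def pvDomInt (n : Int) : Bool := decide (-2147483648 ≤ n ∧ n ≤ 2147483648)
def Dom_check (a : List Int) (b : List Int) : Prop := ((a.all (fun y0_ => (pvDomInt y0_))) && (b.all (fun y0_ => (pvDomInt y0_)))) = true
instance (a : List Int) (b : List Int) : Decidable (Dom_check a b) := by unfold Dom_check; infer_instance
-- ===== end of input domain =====

-- B replaces A's quadratic move-and-revalidate loops by a single O(n) count of the adjacent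
-- equal pairs of the combined sequence (A mutates a and b in place; B does not — the
-- equivalence proved here is about the return value only).

-- ===== PORT A =====
-- valid(a): for i in range(n - 1): if a[i] == a[i + 1]: return False; return True
def pvValid (a : List Int) : Bool :=
  (PySem.List.pyRange 0 ((a.length : Int) - 1) 1).all
    (fun i => !(PySem.List.pyGetD a i 0 == PySem.List.pyGetD a (i + 1) 0))

-- while len(a) > 1: b.append(a.pop())
def movePhase1 (a b : List Int) : List Int × List Int :=
  if 1 < a.length then
    movePhase1 a.dropLast (b ++ [a.getLastD 0])
  else (a, b)
termination_by a.length
decreasing_by simpa [List.length_dropLast] using by omega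

-- while len(b) > 1: a.append(b.pop()); if valid(a) and valid(b): return "YES"
def movePhase2 (a b : List Int) : String :=
  if 1 < b.length then
    let a' := a ++ [b.getLastD 0]
    let b' := b.dropLast
    if pvValid a' && pvValid b' then "YES" else movePhase2 a' b'
  else "NO"
termination_by b.length
decreasing_by simpa [List.length_dropLast] using by omega

def check (a : List Int) (b : List Int) : String :=
  let ab := movePhase1 a b
  if pvValid ab.2 then "YES" else movePhase2 ab.1 ab.2

-- ===== PORT B =====
def check_alt (a : List Int) (b : List Int) : String :=
  let s := b ++ (a.drop 1).reverse
  let eq := (s.zip (s.drop 1)).countP (fun p => p.1 == p.2)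
  if eq == 0 then "YES"
  else if eq == 1 && (a.isEmpty || a.headD 0 != s.getLastD 0) then "YES"
  else "NO"

-- ===== PRECONDITION & SPEC =====
def Spec_check (a : List Int) (b : List Int) (out : String) : Prop := out = check_alt a b
instance (a : List Int) (b : List Int) (out : String) : Decidable (Spec_check a b out) := by unfold Spec_check; infer_instance

-- ===== CLAIM (what is proved, stated in full; the proofs are below) =====
def Claim_equal_check : Prop := ∀ (a : List Int) (b : List Int), Dom_check a b → Spec_check a b (check a b)

-- ===== LEMMAS AND PROOFS =====

-- B's adjacent-equal-pair count
def pvCnt (s : List Int) : Nat := (s.zip (s.drop 1)).countP (fun p => p.1 == p.2)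

theorem pvValid_aux (l : List Int) (k : Nat) (hk : k + 1 < l.length) :
    (PySem.List.pyGetD l (k : Int) 0 = PySem.List.pyGetD l ((k : Int) + 1) 0) ↔ l[k] = l[k+1] := by
  have h1 : ((k : Int) + 1) = ((k + 1 : Nat) : Int) := by push_cast; ring
  rw [h1, PySem.List.pyGetD_natCast, PySem.List.pyGetD_natCast,
    List.getD_eq_getElem l 0 (by omega), List.getD_eq_getElem l 0 hk]

theorem pvValid_iff (l : List Int) : pvValid l = true ↔ List.IsChain (· ≠ ·) l := by
  rw [List.isChain_iff_getElem]
  simp only [pvValid, PySem.List.pyRange_one, List.all_eq_true, List.mem_map, List.mem_range,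
    Bool.not_eq_eq_eq_not, Bool.not_true, beq_eq_false_iff_ne, ne_eq]
  constructor
  · intro h i hi
    have := h ((i : Int)) ⟨i, by omega, by simp⟩
    rw [pvValid_aux l i hi] at this
    exact this
  · rintro h x ⟨i, hi, rfl⟩
    have hi' : i + 1 < l.length := by omega
    rw [show ((0 : Int) + i) = (i : Int) by ring, pvValid_aux l i hi']
    exact h i hi'

theorem zip_pairs_getElem (l : List Int) (i : Nat) (h : i < (l.zip (l.drop 1)).length) :
    (l.zip (l.drop 1))[i] = (l[i]'(by simp at h; omega), l[i+1]'(by simp at h; omega)) := by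
  simp at h
  simp [List.getElem_zip]

theorem pvCnt_eq_zero_iff (l : List Int) : pvCnt l = 0 ↔ List.IsChain (· ≠ ·) l := by
  rw [pvCnt, List.countP_eq_zero, List.isChain_iff_getElem]
  constructor
  · intro h i hi
    have hm : i < (l.zip (l.drop 1)).length := by simp; omega
    have := h _ (List.getElem_mem hm)
    rw [zip_pairs_getElem l i hm] at this
    simpa using this
  · intro h p hp
    obtain ⟨i, hi, rfl⟩ := List.mem_iff_getElem.mp hp
    rw [zip_pairs_getElem l i hi]
    simp at hi ⊢
    exact h i (by omega)

theorem pvCnt_cons (x : Int) (u : List Int) (hu : u ≠ []) :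
    pvCnt (x :: u) = (if x = u.head hu then 1 else 0) + pvCnt u := by
  obtain ⟨y, t, rfl⟩ := List.exists_cons_of_ne_nil hu
  simp [pvCnt, List.countP_cons]
  split
  · simp_all
    omega
  · simp_all

theorem pvCnt_split (s : List Int) (m : Nat) (h1 : 1 ≤ m) (h2 : m < s.length) :
    pvCnt s = pvCnt (s.take m) + (if s[m - 1]'(by omega) = s[m]'h2 then 1 else 0) + pvCnt (s.drop m) := by
  induction m generalizing s with
  | zero => omega
  | succ m ih =>
    obtain ⟨x, t, rfl⟩ := List.exists_cons_of_ne_nil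
      (by intro h; rw [h] at h2; simp at h2 : (s ≠ []))
    have ht : t ≠ [] := by
      intro h; rw [h] at h2; simp at h2
    rcases Nat.eq_zero_or_pos m with hm | hm
    · subst hm
      simp only [List.take_succ_cons, List.take_zero, List.drop_succ_cons, List.drop_zero]
      rw [pvCnt_cons x t ht]
      simp [pvCnt, List.head_eq_getElem]
    · have h2' : m < t.length := by simp at h2; omega
      have htake : (t.take m) ≠ [] := by
        apply List.ne_nil_of_length_pos; simp; omega
      rw [List.take_succ_cons, List.drop_succ_cons,
        pvCnt_cons x t ht, ih t hm h2', pvCnt_cons x (t.take m) htake]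
      have hh : (t.take m).head htake = t.head ht := by
        rw [List.head_eq_getElem, List.head_eq_getElem]
        simp
      rw [hh]
      have e1 : (x :: t)[m + 1 - 1]'(by simp; omega) = t[m - 1]'(by omega) := by
        have hmm : m + 1 - 1 = m := by omega
        simp only [hmm, List.getElem_cons]
        split
        · omega
        · congr 1
      have e2 : (x :: t)[m + 1]'(by simp; omega) = t[m]'h2' := by
        simp
      rw [e1, e2]
      omega

theorem movePhase1_eq (a b : List Int) : movePhase1 a b = (a.take 1, b ++ (a.drop 1).reverse) := by
  fun_induction movePhase1 a b with
  | case1 a b h ih =>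
    rw [ih]
    obtain ⟨u, x, rfl⟩ : ∃ u x, a = u ++ [x] :=
      ⟨a.dropLast, a.getLast (by intro hh; rw [hh] at h; simp at h),
        (List.dropLast_append_getLast _).symm⟩
    have hu : u ≠ [] := by
      intro hh; rw [hh] at h; simp at h
    obtain ⟨y, u', rfl⟩ := List.exists_cons_of_ne_nil hu
    simp [List.getLastD_eq_getLast?, List.take_append, List.drop_append]
    rw [← List.cons_append, List.dropLast_concat, List.getLast?_concat]
    simp
  | case2 a b h =>
    have : a.length ≤ 1 := by omega
    match a, this with
    | [], _ => simp
    | [x], _ => simp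

theorem movePhase2_spec (p s : List Int) (m : Nat) (hm : m ≤ s.length) :
    movePhase2 (p ++ (s.drop m).reverse) (s.take m) =
      if ∃ m' < m, 1 ≤ m' ∧ (pvValid (p ++ (s.drop m').reverse) && pvValid (s.take m')) = true
      then "YES" else "NO" := by
  induction m using Nat.strong_induction_on with
  | _ m ih =>
    match m, hm with
    | 0, _ =>
      rw [movePhase2, if_neg (by simp), if_neg (by rintro ⟨m', hm', h1, _⟩; omega)]
    | 1, hm =>
      rw [movePhase2, if_neg (by simp), if_neg (by rintro ⟨m', hm', h1, _⟩; omega)]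
    | (k+2), hm =>
      have hk : k + 1 < s.length := by omega
      have htake : s.take (k+2) = s.take (k+1) ++ [s[k+1]] := by
        rw [List.take_add_one]
        simp [List.getElem?_eq_getElem hk]
      have key1 : (s.take (k+2)).getLastD 0 = s[k+1] := by
        rw [htake, List.getLastD_concat]
      have key3 : (s.take (k+2)).dropLast = s.take (k+1) := by
        rw [htake, List.dropLast_concat]
      have key2 : (p ++ (s.drop (k+2)).reverse) ++ [s[k+1]] = p ++ (s.drop (k+1)).reverse := by
        rw [List.drop_eq_getElem_cons hk, List.reverse_cons, List.append_assoc]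
      rw [movePhase2]
      rw [if_pos (by simp; omega)]
      simp only [key1, key3, key2]
      rw [ih (k+1) (by omega) (by omega)]
      by_cases hc : (pvValid (p ++ (s.drop (k+1)).reverse) && pvValid (s.take (k+1))) = true
      · rw [if_pos hc, if_pos ⟨k+1, by omega, by omega, hc⟩]
      · rw [if_neg hc]
        have hiff : (∃ m' < k+2, 1 ≤ m' ∧ (pvValid (p ++ (s.drop m').reverse) && pvValid (s.take m')) = true)
            ↔ (∃ m' < k+1, 1 ≤ m' ∧ (pvValid (p ++ (s.drop m').reverse) && pvValid (s.take m')) = true) := by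
          constructor
          · rintro ⟨m', hm', h1, h2⟩
            by_cases h : m' < k + 1
            · exact ⟨m', h, h1, h2⟩
            · have he : m' = k + 1 := by omega
              subst he
              exact absurd h2 hc
          · rintro ⟨m', hm', h1, h2⟩
            exact ⟨m', by omega, h1, h2⟩
        simp only [hiff]

theorem isChain_ne_reverse (l : List Int) :
    List.IsChain (· ≠ ·) l.reverse ↔ List.IsChain (· ≠ ·) l := by
  rw [List.isChain_reverse]
  exact List.IsChain.iff (fun a b => ne_comm)

theorem getLast?_drop_of_lt (s : List Int) (m : Nat) (h : m < s.length) :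
    (s.drop m).getLast? = s.getLast? := by
  have hdrop : (s.drop m) ≠ [] := by apply List.ne_nil_of_length_pos; simp; omega
  conv_rhs => rw [← List.take_append_drop m s]
  rw [List.getLast?_append, List.getLast?_eq_some_getLast hdrop]
  simp

-- the left-hand validity check, decomposed
theorem pvValid_left (a s : List Int) (m : Nat) (_h1 : 1 ≤ m) (h2 : m < s.length) :
    pvValid ((a.take 1) ++ (s.drop m).reverse) = true ↔
      (List.IsChain (· ≠ ·) (s.drop m) ∧ (a.isEmpty || a.headD 0 != s.getLastD 0) = true) := by
  rw [pvValid_iff, List.isChain_append]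
  have hdrop : (s.drop m) ≠ [] := by apply List.ne_nil_of_length_pos; simp; omega
  have hs : s ≠ [] := by intro h; rw [h] at h2; simp at h2
  have hhead : ((s.drop m).reverse).head? = some (s.getLastD 0) := by
    rw [List.head?_reverse, getLast?_drop_of_lt s m h2, List.getLastD_eq_getLast?,
      List.getLast?_eq_some_getLast hs]
    simp
  cases a with
  | nil =>
    simp [isChain_ne_reverse, List.IsChain.nil]
  | cons x t =>
    simp [isChain_ne_reverse, hhead]

-- the core equivalence: some later split works iff there is exactly one adjacent equal
-- pair and the bottom element of a does not clash with the top of the combined pile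
theorem exists_split_iff (a s : List Int) (hnc : ¬ List.IsChain (· ≠ ·) s) :
    (∃ m' < s.length, 1 ≤ m' ∧
        (pvValid ((a.take 1) ++ (s.drop m').reverse) && pvValid (s.take m')) = true) ↔
      (pvCnt s = 1 ∧ (a.isEmpty || a.headD 0 != s.getLastD 0) = true) := by
  have hn0 : pvCnt s ≠ 0 := fun h => hnc ((pvCnt_eq_zero_iff s).mp h)
  constructor
  · rintro ⟨m', hm', h1, hv⟩
    rw [Bool.and_eq_true] at hv
    obtain ⟨hl, hr⟩ := hv
    rw [pvValid_left a s m' h1 hm'] at hl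
    rw [pvValid_iff] at hr
    have hsplit := pvCnt_split s m' h1 hm'
    have ht0 : pvCnt (s.take m') = 0 := (pvCnt_eq_zero_iff _).mpr hr
    have hd0 : pvCnt (s.drop m') = 0 := (pvCnt_eq_zero_iff _).mpr hl.1
    refine ⟨?_, hl.2⟩
    rw [ht0, hd0] at hsplit
    split at hsplit <;> omega
  · rintro ⟨h1, hb⟩
    have hpos : 0 < (s.zip (s.drop 1)).countP (fun p => p.1 == p.2) := by
      have : pvCnt s = 1 := h1
      rw [pvCnt] at this; omega
    obtain ⟨q, hq, hqeq⟩ := List.countP_pos_iff.mp hpos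
    obtain ⟨i, hi, rfl⟩ := List.mem_iff_getElem.mp hq
    have hi1 : i + 1 < s.length := by simp at hi; omega
    rw [zip_pairs_getElem s i hi] at hqeq
    simp at hqeq
    -- split at m' = i + 1
    have hm1 : 1 ≤ i + 1 := by omega
    have hsplit := pvCnt_split s (i+1) hm1 hi1
    rw [h1] at hsplit
    have hite : (if s[i + 1 - 1]'(by omega) = s[i+1]'hi1 then 1 else 0) = 1 := by
      simp [hqeq]
    rw [hite] at hsplit
    have ht0 : pvCnt (s.take (i+1)) = 0 := by omega
    have hd0 : pvCnt (s.drop (i+1)) = 0 := by omega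
    refine ⟨i+1, hi1, hm1, ?_⟩
    rw [Bool.and_eq_true, pvValid_left a s (i+1) hm1 hi1, pvValid_iff]
    exact ⟨⟨(pvCnt_eq_zero_iff _).mp hd0, hb⟩, (pvCnt_eq_zero_iff _).mp ht0⟩

-- final assembly
theorem check_eq (a b : List Int) : check a b = check_alt a b := by
  unfold check check_alt
  rw [movePhase1_eq]
  simp only
  by_cases hC : List.IsChain (· ≠ ·) (b ++ (a.drop 1).reverse)
  · rw [if_pos ((pvValid_iff _).mpr hC)]
    have h0 : pvCnt (b ++ (a.drop 1).reverse) = 0 := (pvCnt_eq_zero_iff _).mpr hC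
    rw [pvCnt] at h0
    rw [h0]
    simp
  · have hn0 : pvCnt (b ++ (a.drop 1).reverse) ≠ 0 :=
      fun h => hC ((pvCnt_eq_zero_iff _).mp h)
    rw [if_neg (by rw [pvValid_iff]; exact hC)]
    have hphase := movePhase2_spec (a.take 1) (b ++ (a.drop 1).reverse)
      (b ++ (a.drop 1).reverse).length le_rfl
    simp only [List.drop_length, List.reverse_nil, List.append_nil, List.take_length] at hphase
    rw [hphase]
    have hn0' : ((b ++ (a.drop 1).reverse).zip ((b ++ (a.drop 1).reverse).drop 1)).countP
        (fun p => p.1 == p.2) ≠ 0 := by rw [pvCnt] at hn0; exact hn0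
    have hb0 : ¬ ((((b ++ (a.drop 1).reverse).zip ((b ++ (a.drop 1).reverse).drop 1)).countP
        (fun p => p.1 == p.2) == 0) = true) := by
      simp only [beq_iff_eq]
      exact hn0'
    rw [if_neg hb0]
    by_cases h1 : pvCnt (b ++ (a.drop 1).reverse) = 1 ∧
        (a.isEmpty || a.headD 0 != (b ++ (a.drop 1).reverse).getLastD 0) = true
    · rw [if_pos ((exists_split_iff a _ hC).mpr h1)]
      have hc1 : ((((b ++ (a.drop 1).reverse).zip ((b ++ (a.drop 1).reverse).drop 1)).countP
          (fun p => p.1 == p.2) == 1) &&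
          (a.isEmpty || a.headD 0 != (b ++ (a.drop 1).reverse).getLastD 0)) = true := by
        rw [Bool.and_eq_true, beq_iff_eq]
        exact ⟨by rw [← pvCnt]; exact h1.1, h1.2⟩
      rw [if_pos hc1]
    · rw [if_neg (fun hcon => h1 ((exists_split_iff a _ hC).mp hcon))]
      have hc1 : ¬ (((((b ++ (a.drop 1).reverse).zip ((b ++ (a.drop 1).reverse).drop 1)).countP
          (fun p => p.1 == p.2) == 1) &&
          (a.isEmpty || a.headD 0 != (b ++ (a.drop 1).reverse).getLastD 0)) = true) := by
        rw [Bool.and_eq_true, beq_iff_eq]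
        intro hcon
        exact h1 ⟨by rw [pvCnt]; exact hcon.1, hcon.2⟩
      rw [if_neg hc1]

-- ===== VERDICT (by name: the statement is the Claim_ definition above) =====
theorem check_spec : Claim_equal_check := by
  intro a b _
  unfold Spec_check
  exact check_eq a b
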